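-- pv_equiv track=rewrite | github.com/rain2473/coding-test | 프로그래머스/lv0/120842. 2차원으로 만들기/2차원으로 만들기.py | solution
-- ===== SOURCE A (Python) =====
-- def solution(num_list, n):
--     answer = []
--     tmp = []
--     for m in num_list:
--         tmp.append(m)
--         if len(tmp) == n:
--             answer.append(tmp)
--             tmp = []
--     return answer
-- ===== SOURCE B (Python) =====
-- def solution(num_list, n):
--     if n <= 0 or len(num_list) < n:
--         return []
--     return [num_list[:n]] + solution(num_list[n:], n)
-- ===== Notes on version B (the rewrite author's own statement) =====
-- stated objective: alternative
-- what changed: Replaces A's single pass with a per-element buffer and length check by structural recursion on slices: take the first n elements as a row and recurse on the rest, the trailing partial row vanishing at the base case.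
import Mathlib
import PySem

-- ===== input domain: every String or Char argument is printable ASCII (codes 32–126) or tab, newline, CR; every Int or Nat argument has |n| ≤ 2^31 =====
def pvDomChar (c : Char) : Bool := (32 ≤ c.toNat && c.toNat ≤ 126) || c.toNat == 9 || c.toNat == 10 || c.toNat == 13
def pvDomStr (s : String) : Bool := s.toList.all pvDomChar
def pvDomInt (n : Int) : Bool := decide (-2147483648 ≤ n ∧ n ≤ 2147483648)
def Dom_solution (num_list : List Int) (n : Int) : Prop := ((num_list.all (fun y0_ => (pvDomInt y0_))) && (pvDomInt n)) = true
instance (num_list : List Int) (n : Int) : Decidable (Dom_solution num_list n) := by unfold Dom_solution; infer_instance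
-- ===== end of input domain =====

-- B re-chunks by recursion on slices (take a row, recurse on the rest) instead of A's
-- per-element buffer accumulation; alternative decomposition, same cost, same return values.

-- ===== PORT A =====
def solution (num_list : List Int) (n : Int) : List (List Int) :=
  (num_list.foldl
    (fun (st : List (List Int) × List Int) (m : Int) =>
      let tmp := st.2 ++ [m]
      if (tmp.length : Int) = n then (st.1 ++ [tmp], ([] : List Int)) else (st.1, tmp))
    (([] : List (List Int)), ([] : List Int))).1

-- ===== PORT B =====
def solution_alt (num_list : List Int) (n : Int) : List (List Int) :=
  if n ≤ 0 ∨ (num_list.length : Int) < n then []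
  else
    PySem.List.slice num_list none (some n)
      :: solution_alt (PySem.List.slice num_list (some n) none) n
termination_by num_list.length
decreasing_by
  rename_i h
  rw [PySem.List.slice_from num_list (by omega)]
  simp only [List.length_drop]
  omega

-- ===== PRECONDITION & SPEC =====
def Spec_solution (num_list : List Int) (n : Int) (out : List (List Int)) : Prop := out = solution_alt num_list n
instance (num_list : List Int) (n : Int) (out : List (List Int)) : Decidable (Spec_solution num_list n out) := by unfold Spec_solution; infer_instance

-- ===== CLAIM (what is proved, stated in full; the proofs are below) =====
def Claim_equal_solution : Prop := ∀ (num_list : List Int) (n : Int), Dom_solution num_list n → Spec_solution num_list n (solution num_list n)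

-- ===== LEMMAS AND PROOFS =====

-- For n ≤ 0 the buffer test in A never fires, so A returns the initial accumulator.
theorem loopA_nonpos (n : Int) (hn : n ≤ 0) :
    ∀ (l : List Int) (acc : List (List Int)) (tmp : List Int),
      (l.foldl
        (fun (st : List (List Int) × List Int) (m : Int) =>
          let tmp := st.2 ++ [m]
          if (tmp.length : Int) = n then (st.1 ++ [tmp], ([] : List Int)) else (st.1, tmp))
        (acc, tmp)).1 = acc := by
  intro l
  induction l with
  | nil => intro acc tmp; rfl
  | cons m l ih =>
      intro acc tmp
      simp only [List.foldl_cons]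
      rw [if_neg (by simp; omega)]
      exact ih acc (tmp ++ [m])

-- Loop invariant for n > 0: A's fold with pending buffer tmp (shorter than n)
-- produces acc followed by B's chunking of tmp ++ l.
theorem loopA_pos (n : Int) (hn : 0 < n) :
    ∀ (l : List Int) (acc : List (List Int)) (tmp : List Int),
      (tmp.length : Int) < n →
      (l.foldl
        (fun (st : List (List Int) × List Int) (m : Int) =>
          let tmp := st.2 ++ [m]
          if (tmp.length : Int) = n then (st.1 ++ [tmp], ([] : List Int)) else (st.1, tmp))
        (acc, tmp)).1 = acc ++ solution_alt (tmp ++ l) n := by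
  intro l
  induction l with
  | nil =>
      intro acc tmp ht
      rw [solution_alt, if_pos (by simpa using Or.inr ht)]
      simp
  | cons m l ih =>
      intro acc tmp ht
      simp only [List.foldl_cons]
      by_cases h : ((tmp ++ [m]).length : Int) = n
      · rw [if_pos h]
        have hlen : (tmp ++ [m]).length = n.toNat := by simp at h ⊢; omega
        have hc : ¬ (n ≤ 0 ∨ ((((tmp ++ [m]) ++ l).length : Int) < n)) := by
          push Not
          refine ⟨hn, ?_⟩
          simp only [List.length_append] at h ⊢
          push_cast at h ⊢
          omega
        have hR : solution_alt (tmp ++ m :: l) n = (tmp ++ [m]) :: solution_alt l n := by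
          have hsplit : tmp ++ m :: l = (tmp ++ [m]) ++ l := by simp
          rw [hsplit, solution_alt, if_neg hc,
            PySem.List.slice_to _ (le_of_lt hn), PySem.List.slice_from _ (le_of_lt hn),
            ← hlen, List.take_left, List.drop_left]
        rw [hR, ih (acc ++ [tmp ++ [m]]) [] (by simpa using hn)]
        simp
      · rw [if_neg h]
        rw [ih acc (tmp ++ [m]) (by simp at h ⊢; omega)]
        simp

theorem solution_eq_alt (num_list : List Int) (n : Int) :
    solution num_list n = solution_alt num_list n := by
  by_cases hn : n ≤ 0
  · rw [solution_alt, if_pos (Or.inl hn)]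
    exact loopA_nonpos n hn num_list [] []
  · have := loopA_pos n (by omega) num_list [] [] (by simp; omega)
    simpa [solution] using this

-- ===== VERDICT (by name: the statement is the Claim_ definition above) =====
theorem solution_spec : Claim_equal_solution := by
  intro num_list n _
  exact solution_eq_alt num_list n
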